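-- pv_equiv track=rewrite | github.com/joilsonsr/simulador_roleta_com_grafico | simulador_rodadas_com_graficos.py | calcular_frequencia_recente
-- ===== SOURCE A (Python) =====
-- from collections import Counter
--
-- COLUNA_1 = {1, 4, 7, 10, 13, 16, 19, 22, 25, 28, 31, 34}
--
-- COLUNA_2 = {2, 5, 8, 11, 14, 17, 20, 23, 26, 29, 32, 35}
--
-- COLUNA_3 = {3, 6, 9, 12, 15, 18, 21, 24, 27, 30, 33, 36}
--
-- def calcular_frequencia_recente(resultados):
--     contagem = Counter()
--     for numero, _ in resultados:
--         if numero in COLUNA_1: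
--             contagem["coluna_1"] += 1
--         elif numero in COLUNA_2:
--             contagem["coluna_2"] += 1
--         elif numero in COLUNA_3:
--             contagem["coluna_3"] += 1
--     return dict(contagem)
-- ===== SOURCE B (Python) =====
-- COLUNA_1 = {1, 4, 7, 10, 13, 16, 19, 22, 25, 28, 31, 34}
-- COLUNA_2 = {2, 5, 8, 11, 14, 17, 20, 23, 26, 29, 32, 35}
-- COLUNA_3 = {3, 6, 9, 12, 15, 18, 21, 24, 27, 30, 33, 36}
--
-- # One lookup table mapping each roulette number to its column name.
-- COLUNA_MAP = {}
-- for _nome, _col in (("coluna_1", COLUNA_1), ("coluna_2", COLUNA_2), ("coluna_3", COLUNA_3)):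
--     for _n in sorted(_col):
--         COLUNA_MAP[_n] = _nome
--
-- def calcular_frequencia_recente(resultados):
--     # Staged: first extract the column label of each matching number,
--     # then count each distinct label (first-occurrence order, like Counter's insertion order).
--     rotulos = [COLUNA_MAP[numero] for numero, _ in resultados if numero in COLUNA_MAP]
--     return {r: rotulos.count(r) for r in dict.fromkeys(rotulos)}
-- ===== Notes on version B (the rewrite author's own statement) =====
-- stated objective: alternative
-- what changed: Replaces the single-pass three-way set-membership branch chain accumulating a Counter by a precomputed number-to-column lookup table plus a staged map-then-count: first extract the label list, then build the result as {label: labels.count(label)} over the first-occurrence-deduplicated labels.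
import Mathlib
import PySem

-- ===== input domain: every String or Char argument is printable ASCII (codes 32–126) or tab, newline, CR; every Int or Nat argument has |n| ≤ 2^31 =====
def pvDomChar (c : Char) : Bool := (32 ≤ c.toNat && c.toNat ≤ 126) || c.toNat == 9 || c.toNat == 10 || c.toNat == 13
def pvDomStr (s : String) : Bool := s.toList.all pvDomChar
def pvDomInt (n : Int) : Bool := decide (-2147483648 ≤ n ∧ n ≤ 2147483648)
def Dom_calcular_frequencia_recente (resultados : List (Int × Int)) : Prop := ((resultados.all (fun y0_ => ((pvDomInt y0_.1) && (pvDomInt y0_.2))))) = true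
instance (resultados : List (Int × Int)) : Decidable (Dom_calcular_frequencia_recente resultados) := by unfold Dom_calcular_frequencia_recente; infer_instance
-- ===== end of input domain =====

-- B replaces A's single-pass three-way set-membership Counter loop by a precomputed number->column lookup table and a staged map-then-count (label list, then count per distinct label); objective: alternative decomposition, not speed.


-- ===== PORT A =====
def COLUNA_1 : List Int := [1, 4, 7, 10, 13, 16, 19, 22, 25, 28, 31, 34]
def COLUNA_2 : List Int := [2, 5, 8, 11, 14, 17, 20, 23, 26, 29, 32, 35]
def COLUNA_3 : List Int := [3, 6, 9, 12, 15, 18, 21, 24, 27, 30, 33, 36]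

def calcular_frequencia_recente (resultados : List (Int × Int)) : List (String × Int) :=
  (resultados.foldl (fun contagem p =>
      if p.1 ∈ COLUNA_1 then contagem.modify "coluna_1" 0 (· + 1)
      else if p.1 ∈ COLUNA_2 then contagem.modify "coluna_2" 0 (· + 1)
      else if p.1 ∈ COLUNA_3 then contagem.modify "coluna_3" 0 (· + 1)
      else contagem)
    (PySem.Dict.empty : PySem.Dict String Int)).items

-- ===== PORT B =====
def COLUNA_MAP : PySem.Dict Int String :=
  ([("coluna_1", COLUNA_1), ("coluna_2", COLUNA_2), ("coluna_3", COLUNA_3)].foldl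
    (fun d nc => nc.2.foldl (fun d n => d.insert n nc.1) d) PySem.Dict.empty)

def calcular_frequencia_recente_alt (resultados : List (Int × Int)) : List (String × Int) :=
  let rotulos := resultados.filterMap (fun p => COLUNA_MAP.get? p.1)
  (PySem.List.dedup rotulos).map (fun r => (r, (rotulos.count r : Int)))

-- ===== PRECONDITION & SPEC =====
def Spec_calcular_frequencia_recente (resultados : List (Int × Int)) (out : List (String × Int)) : Prop := out = calcular_frequencia_recente_alt resultados
instance (resultados : List (Int × Int)) (out : List (String × Int)) : Decidable (Spec_calcular_frequencia_recente resultados out) := by unfold Spec_calcular_frequencia_recente; infer_instance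

-- ===== CLAIM (what is proved, stated in full; the proofs are below) =====
def Claim_equal_calcular_frequencia_recente : Prop := ∀ (resultados : List (Int × Int)), Dom_calcular_frequencia_recente resultados → Spec_calcular_frequencia_recente resultados (calcular_frequencia_recente resultados)

-- ===== LEMMAS AND PROOFS =====


lemma pv_map_items : COLUNA_MAP = PySem.Dict.mk
    [(1, "coluna_1"), (4, "coluna_1"), (7, "coluna_1"), (10, "coluna_1"), (13, "coluna_1"),
     (16, "coluna_1"), (19, "coluna_1"), (22, "coluna_1"), (25, "coluna_1"), (28, "coluna_1"),
     (31, "coluna_1"), (34, "coluna_1"),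
     (2, "coluna_2"), (5, "coluna_2"), (8, "coluna_2"), (11, "coluna_2"), (14, "coluna_2"),
     (17, "coluna_2"), (20, "coluna_2"), (23, "coluna_2"), (26, "coluna_2"), (29, "coluna_2"),
     (32, "coluna_2"), (35, "coluna_2"),
     (3, "coluna_3"), (6, "coluna_3"), (9, "coluna_3"), (12, "coluna_3"), (15, "coluna_3"),
     (18, "coluna_3"), (21, "coluna_3"), (24, "coluna_3"), (27, "coluna_3"), (30, "coluna_3"),
     (33, "coluna_3"), (36, "coluna_3")] := by decide

set_option maxHeartbeats 2000000 in
set_option maxRecDepth 8192 in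
lemma pv_map_get (n : Int) :
    COLUNA_MAP.get? n =
      if n ∈ COLUNA_1 then some "coluna_1"
      else if n ∈ COLUNA_2 then some "coluna_2"
      else if n ∈ COLUNA_3 then some "coluna_3"
      else none := by
  by_cases h1 : n ∈ COLUNA_1
  · fin_cases h1 <;> decide
  by_cases h2 : n ∈ COLUNA_2
  · fin_cases h2 <;> decide
  by_cases h3 : n ∈ COLUNA_3
  · fin_cases h3 <;> decide
  simp only [h1, h2, h3, if_false]
  simp only [COLUNA_1, COLUNA_2, COLUNA_3, List.mem_cons, List.not_mem_nil, or_false,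
    not_or] at h1 h2 h3
  rw [pv_map_items]
  simp only [PySem.Dict.get?]
  rw [List.find?_eq_none.mpr]
  · rfl
  intro p hp
  fin_cases hp <;> simp [beq_iff_eq] <;> omega

lemma pv_fold_eq_counter (resultados : List (Int × Int)) (d : PySem.Dict String Int) :
    resultados.foldl (fun contagem p =>
      if p.1 ∈ COLUNA_1 then contagem.modify "coluna_1" 0 (· + 1)
      else if p.1 ∈ COLUNA_2 then contagem.modify "coluna_2" 0 (· + 1)
      else if p.1 ∈ COLUNA_3 then contagem.modify "coluna_3" 0 (· + 1)
      else contagem) d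
    = (resultados.filterMap (fun p => COLUNA_MAP.get? p.1)).foldl
        (fun d x => d.modify x 0 (· + 1)) d := by
  induction resultados generalizing d with
  | nil => rfl
  | cons p rest ih =>
      simp only [List.foldl_cons, List.filterMap_cons]
      rw [pv_map_get p.1]
      by_cases h1 : p.1 ∈ COLUNA_1
      · simp [h1, ih]
      · by_cases h2 : p.1 ∈ COLUNA_2
        · simp [h1, h2, ih]
        · by_cases h3 : p.1 ∈ COLUNA_3
          · simp [h1, h2, h3, ih]
          · simp [h1, h2, h3, ih]

-- ===== VERDICT (by name: the statement is the Claim_ definition above) =====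
theorem calcular_frequencia_recente_spec : Claim_equal_calcular_frequencia_recente := by
  intro resultados _
  unfold Spec_calcular_frequencia_recente calcular_frequencia_recente calcular_frequencia_recente_alt
  rw [pv_fold_eq_counter, ← PySem.Dict.counter_eq_foldl, PySem.Dict.items_counter]
  simp
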